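-- pv_equiv track=rewrite | github.com/ArsamS/COMP10001-Phazed | Phazed.py | this_turn_played
-- ===== SOURCE A (Python) =====
-- from collections import defaultdict as dd
--
-- def this_turn_played(play_type, history):
--     '''
--     Determines if a player has already completed certain play types in a
--     given turn by returning either True or False
--     '''
--     play_dict = dd(list)
--     play_no = 0
--     for play in history:
--         play_dict[play_no] += [play]
--         if play[0] == 5:
--             play_no += 1
--             play_dict[play_no] = []
--
--     current = len(play_dict) - 1
--     current_run = play_dict[current]
--     for p in play_type:
--         for action in current_run:
--             if p in action:
--                 return True
--     return False
-- ===== SOURCE B (Python) =====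
-- def this_turn_played(play_type, history):
--     # Scan backwards, collecting only the plays after the last turn-ending play
--     # (first element 5); stop at the first such play seen from the end.
--     current_run = []
--     for play in reversed(history):
--         if play[0] == 5:
--             break
--         current_run.append(play)
--     wanted = set(play_type)
--     return any(p in wanted for action in current_run for p in action)
-- ===== Notes on version B (the rewrite author's own statement) =====
-- stated objective: simpler
-- what changed: A builds a defaultdict of every run segment keyed by a running play counter and then reads the last one with nested list-membership loops; B drops the dict entirely, collecting only the last segment by a backward scan that stops at the first run-ending play, and tests membership against a set of play_type.
import Mathlib
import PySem

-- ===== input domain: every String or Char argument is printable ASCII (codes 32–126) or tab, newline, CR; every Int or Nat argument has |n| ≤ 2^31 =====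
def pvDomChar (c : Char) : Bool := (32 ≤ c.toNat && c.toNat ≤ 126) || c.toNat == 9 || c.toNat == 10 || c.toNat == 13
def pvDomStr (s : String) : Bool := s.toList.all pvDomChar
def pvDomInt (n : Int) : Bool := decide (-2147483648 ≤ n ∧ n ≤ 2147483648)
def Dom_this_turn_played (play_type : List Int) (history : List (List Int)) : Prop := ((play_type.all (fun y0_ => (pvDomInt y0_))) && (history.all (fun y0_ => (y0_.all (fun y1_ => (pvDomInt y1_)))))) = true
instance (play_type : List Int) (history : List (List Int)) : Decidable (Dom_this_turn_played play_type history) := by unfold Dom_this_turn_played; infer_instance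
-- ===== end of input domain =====

-- B replaces A's defaultdict of all run segments by a single backward scan that
-- keeps only the plays after the last run-ending play; objective: simpler.

-- ===== PORT A =====
-- one iteration of A's 'for play in history' loop over the state (play_dict, play_no);
-- play[0] is PySem.List.pyGetD (the IndexError inputs are excluded by Pre_)
def pvStepA (st : PySem.Dict Int (List (List Int)) × Int) (play : List Int) :
    PySem.Dict Int (List (List Int)) × Int :=
  let d1 := st.1.insert st.2 (st.1.getD st.2 [] ++ [play])   -- play_dict[play_no] += [play]
  if PySem.List.pyGetD play 0 0 = 5 then
    ((d1.insert (st.2 + 1) []), st.2 + 1)                    -- play_no += 1; play_dict[play_no] = []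
  else
    (d1, st.2)

def this_turn_played (play_type : List Int) (history : List (List Int)) : Bool :=
  let s := history.foldl pvStepA (PySem.Dict.empty, 0)
  let current : Int := (s.1.size : Int) - 1
  let current_run := s.1.getD current []    -- defaultdict read: a missing key yields []
  -- the nested 'for p … for action …' loops with early 'return True'
  play_type.any (fun p => current_run.any (fun action => action.contains p))

-- ===== PORT B =====
-- 'for play in reversed(history): if play[0] == 5: break; current_run.append(play)'
def pvCollectRun : List (List Int) → List (List Int)
  | [] => []
  | play :: rest =>
      if PySem.List.pyGetD play 0 0 = 5 then [] else play :: pvCollectRun rest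

def this_turn_played_alt (play_type : List Int) (history : List (List Int)) : Bool :=
  let current_run := pvCollectRun history.reverse
  let wanted : PySem.Set Int := PySem.Set.ofList play_type
  current_run.any (fun action => action.any (fun p => wanted.contains p))

-- ===== PRECONDITION & SPEC =====
-- Pre_ excludes histories containing an empty play: there Python A raises IndexError on play[0].
def Pre_this_turn_played (play_type : List Int) (history : List (List Int)) : Prop :=
  ∀ play ∈ history, play ≠ []
instance (play_type : List Int) (history : List (List Int)) : Decidable (Pre_this_turn_played play_type history) := by unfold Pre_this_turn_played; infer_instance

def pvWitness_this_turn_played : List Int × List (List Int) := ([2, 5], [[1, 2], [5, 0], [3, 2]])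

def Spec_this_turn_played (play_type : List Int) (history : List (List Int)) (out : Bool) : Prop := out = this_turn_played_alt play_type history
instance (play_type : List Int) (history : List (List Int)) (out : Bool) : Decidable (Spec_this_turn_played play_type history out) := by unfold Spec_this_turn_played; infer_instance

-- ===== CLAIM (what is proved, stated in full; the proofs are below) =====
def Claim_equal_this_turn_played : Prop := ∀ (play_type : List Int) (history : List (List Int)), Dom_this_turn_played play_type history → Pre_this_turn_played play_type history → Spec_this_turn_played play_type history (this_turn_played play_type history)

-- ===== LEMMAS AND PROOFS =====

-- the keys of A's dict after m run breaks: 0, 1, …, m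
def pvKeys (m : Nat) : List Int := (List.range (m + 1)).map (fun a => (a : Int))

-- the current segment, computed forwards as A maintains it
def pvSeg (acc : List (List Int)) (h : List (List Int)) : List (List Int) :=
  h.foldl (fun a play => if PySem.List.pyGetD play 0 0 = 5 then [] else a ++ [play]) acc

theorem pvSeg_cons (acc : List (List Int)) (play : List Int) (rest : List (List Int)) :
    pvSeg acc (play :: rest) =
      pvSeg (if PySem.List.pyGetD play 0 0 = 5 then [] else acc ++ [play]) rest := rfl

theorem pvKeys_succ (m : Nat) : pvKeys (m + 1) = pvKeys m ++ [((m : Int) + 1)] := by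
  simp [pvKeys, List.range_succ]

theorem pvNotMem_pvKeys (m : Nat) : ((m : Int) + 1) ∉ pvKeys m := by
  simp [pvKeys]
  intro a ha
  omega

theorem pvMem_pvKeys (m : Nat) : (m : Int) ∈ pvKeys m := by
  simp [pvKeys]

-- loop invariant for A's dict-building loop, once the dict holds keys 0..m
theorem pvLoopA (h : List (List Int)) :
    ∀ (d : PySem.Dict Int (List (List Int))) (m : Nat) (acc : List (List Int)),
    d.keys = pvKeys m → d.getD (m : Int) [] = acc →
    ∃ m' : Nat,
      (h.foldl pvStepA (d, (m : Int))).2 = (m' : Int) ∧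
      (h.foldl pvStepA (d, (m : Int))).1.keys = pvKeys m' ∧
      (h.foldl pvStepA (d, (m : Int))).1.getD (m' : Int) [] = pvSeg acc h := by
  induction h with
  | nil => intro d m acc hk hg; exact ⟨m, rfl, hk, by simpa [pvSeg] using hg⟩
  | cons play rest ih =>
      intro d m acc hk hg
      have hcont : d.contains (m : Int) = true :=
        (PySem.Dict.contains_iff_mem_keys d _).mpr (hk ▸ pvMem_pvKeys m)
      by_cases h5 : PySem.List.pyGetD play 0 0 = 5
      · -- run break: a fresh empty segment is opened at key m+1
        have hstep : pvStepA (d, (m : Int)) play =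
            (((d.insert (m : Int) (acc ++ [play])).insert ((m : Int) + 1) []), (m : Int) + 1) := by
          simp [pvStepA, h5, hg]
        have hnc : (d.insert (m : Int) (acc ++ [play])).contains ((m : Int) + 1) = false := by
          rw [← Bool.not_eq_true, PySem.Dict.contains_iff_mem_keys,
            PySem.Dict.keys_insert_of_contains d _ hcont, hk]
          exact pvNotMem_pvKeys m
        have hk' : ((d.insert (m : Int) (acc ++ [play])).insert ((m : Int) + 1) []).keys
            = pvKeys (m + 1) := by
          rw [PySem.Dict.keys_insert_of_not_contains _ _ hnc,
            PySem.Dict.keys_insert_of_contains d _ hcont, hk, pvKeys_succ]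
        have hg' : ((d.insert (m : Int) (acc ++ [play])).insert ((m : Int) + 1) []).getD
            (((m + 1 : Nat)) : Int) [] = [] := by
          push_cast
          exact PySem.Dict.getD_insert_self _ _ _ _
        obtain ⟨m', h1, h2, h3⟩ :=
          ih ((d.insert (m : Int) (acc ++ [play])).insert ((m : Int) + 1) []) (m + 1) [] hk' hg'
        push_cast at h1 h2 h3
        refine ⟨m', ?_, ?_, ?_⟩ <;> rw [List.foldl_cons, hstep]
        · exact h1
        · exact h2
        · rw [pvSeg_cons, if_pos h5]; exact h3
      · -- ordinary play: appended to the current segment at key m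
        have hstep : pvStepA (d, (m : Int)) play = (d.insert (m : Int) (acc ++ [play]), (m : Int)) := by
          simp [pvStepA, h5, hg]
        have hk' : (d.insert (m : Int) (acc ++ [play])).keys = pvKeys m := by
          rw [PySem.Dict.keys_insert_of_contains d _ hcont, hk]
        have hg' : (d.insert (m : Int) (acc ++ [play])).getD (m : Int) [] = acc ++ [play] :=
          PySem.Dict.getD_insert_self _ _ _ _
        obtain ⟨m', h1, h2, h3⟩ := ih (d.insert (m : Int) (acc ++ [play])) m (acc ++ [play]) hk' hg'
        refine ⟨m', ?_, ?_, ?_⟩ <;> rw [List.foldl_cons, hstep]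
        · exact h1
        · exact h2
        · rw [pvSeg_cons, if_neg h5]; exact h3

-- A's full loop from the empty defaultdict, for a nonempty history
theorem pvLoopA_full (play : List Int) (rest : List (List Int)) :
    ∃ m' : Nat,
      ((play :: rest).foldl pvStepA (PySem.Dict.empty, (0 : Int))).2 = (m' : Int) ∧
      ((play :: rest).foldl pvStepA (PySem.Dict.empty, (0 : Int))).1.keys = pvKeys m' ∧
      ((play :: rest).foldl pvStepA (PySem.Dict.empty, (0 : Int))).1.getD (m' : Int) []
        = pvSeg [] (play :: rest) := by
  by_cases h5 : PySem.List.pyGetD play 0 0 = 5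
  · have hstep : pvStepA (PySem.Dict.empty, (0 : Int)) play =
        (((PySem.Dict.empty.insert (0 : Int) [play]).insert (1 : Int) []), (1 : Int)) := by
      simp [pvStepA, h5]
    have hk' : ((PySem.Dict.empty.insert (0 : Int) ([] ++ [play])).insert ((0 : Int) + 1) []).keys
        = pvKeys (0 + 1) := by
      rw [PySem.Dict.keys_insert_of_not_contains _ _ (by simp [PySem.Dict.contains_insert]),
        PySem.Dict.keys_insert_of_not_contains _ _ (by decide)]
      rfl
    have hg' : ((PySem.Dict.empty.insert (0 : Int) ([] ++ [play])).insert ((0 : Int) + 1) []).getD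
        (((0 + 1 : Nat)) : Int) [] = [] := by
      push_cast
      exact PySem.Dict.getD_insert_self _ _ _ _
    obtain ⟨m', h1, h2, h3⟩ :=
      pvLoopA rest ((PySem.Dict.empty.insert (0 : Int) ([] ++ [play])).insert ((0 : Int) + 1) [])
        (0 + 1) [] (by simp only [Nat.zero_add] at hk' ⊢; exact hk') (by simp only [Nat.zero_add] at hg' ⊢; exact hg')
    push_cast at h1 h2 h3
    refine ⟨m', ?_, ?_, ?_⟩ <;> rw [List.foldl_cons, hstep]
    · simpa using h1
    · simpa using h2
    · rw [pvSeg_cons, if_pos h5]; simpa using h3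
  · have hstep : pvStepA (PySem.Dict.empty, (0 : Int)) play =
        (PySem.Dict.empty.insert (0 : Int) [play], (0 : Int)) := by
      simp [pvStepA, h5]
    have hk' : (PySem.Dict.empty.insert (0 : Int) [play]).keys = pvKeys 0 := by
      rw [PySem.Dict.keys_insert_of_not_contains _ _ (by decide)]
      rfl
    have hg' : (PySem.Dict.empty.insert (0 : Int) [play]).getD ((0 : Nat) : Int) [] = [play] := by
      push_cast
      exact PySem.Dict.getD_insert_self _ _ _ _
    obtain ⟨m', h1, h2, h3⟩ := pvLoopA rest (PySem.Dict.empty.insert (0 : Int) [play]) 0 [play] hk' hg'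
    push_cast at h1 h2 h3
    refine ⟨m', ?_, ?_, ?_⟩ <;> rw [List.foldl_cons, hstep]
    · exact h1
    · exact h2
    · rw [pvSeg_cons, if_neg h5]; simpa using h3

-- B's backward scan computes the reverse of A's forward segment
theorem pvCollectRun_reverse (h : List (List Int)) :
    pvCollectRun h.reverse = (pvSeg [] h).reverse := by
  induction h using List.reverseRecOn with
  | nil => simp [pvCollectRun, pvSeg]
  | append_singleton rest play ih =>
      by_cases h5 : PySem.List.pyGetD play 0 0 = 5 <;>
        simp [pvCollectRun, pvSeg, h5, ih, List.foldl_append]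

-- A's nested any over play_type/segment equals B's any over the reversed segment with a Set
theorem pvResult_eq (play_type : List Int) (seg : List (List Int)) :
    play_type.any (fun p => seg.any (fun action => action.contains p)) =
    seg.reverse.any (fun action => action.any (fun p => (PySem.Set.ofList play_type).contains p)) := by
  rw [Bool.eq_iff_iff]
  simp only [List.any_eq_true, List.mem_reverse, PySem.Set.contains, List.elem_iff,
    PySem.Set.mem_ofList]
  tauto

-- ===== VERDICT (by name: the statement is the Claim_ definition above) =====
theorem this_turn_played_spec : Claim_equal_this_turn_played := by
  intro play_type history _hdom _hpre
  simp only [Spec_this_turn_played, this_turn_played, this_turn_played_alt]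
  cases history with
  | nil => simp [pvCollectRun]
  | cons play rest =>
      obtain ⟨m', h1, h2, h3⟩ := pvLoopA_full play rest
      have hsize : ((play :: rest).foldl pvStepA (PySem.Dict.empty, (0 : Int))).1.size = m' + 1 := by
        have hlen : ((play :: rest).foldl pvStepA (PySem.Dict.empty, (0 : Int))).1.keys.length
            = m' + 1 := by rw [h2]; simp [pvKeys]
        simpa [PySem.Dict.size, PySem.Dict.keys] using hlen
      rw [hsize]
      have hcur : ((m' + 1 : Nat) : Int) - 1 = (m' : Int) := by push_cast; ring
      rw [hcur, h3, pvCollectRun_reverse]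
      exact pvResult_eq play_type (pvSeg [] (play :: rest))
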